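-- pv_equiv track=rewrite | github.com/sachinsahoo98/Test_Repository_Code | Strings/cod10.py | convertUppercase
-- ===== SOURCE A (Python) =====
-- def convertUppercase(inputStr):
--
--     outputStr = ""
--     charScanned = 0
--     strLen = len(inputStr)
--     for char in inputStr:
--         charScanned+=1
--         if charScanned <= int(strLen/2):
--             outputStr+= char
--         else:
--             outputStr += char.upper()
--     return outputStr
-- ===== SOURCE B (Python) =====
-- def convertUppercase(inputStr):
--     half = len(inputStr) // 2
--     return inputStr[:half] + inputStr[half:].upper()
-- ===== Notes on version B (the rewrite author's own statement) =====
-- stated objective: simpler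
-- what changed: Replaces the per-character loop with running counter and incremental string accumulation by a closed-form two-slice split: keep the first len//2 characters and uppercase the whole second slice in one call.
import Mathlib
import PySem

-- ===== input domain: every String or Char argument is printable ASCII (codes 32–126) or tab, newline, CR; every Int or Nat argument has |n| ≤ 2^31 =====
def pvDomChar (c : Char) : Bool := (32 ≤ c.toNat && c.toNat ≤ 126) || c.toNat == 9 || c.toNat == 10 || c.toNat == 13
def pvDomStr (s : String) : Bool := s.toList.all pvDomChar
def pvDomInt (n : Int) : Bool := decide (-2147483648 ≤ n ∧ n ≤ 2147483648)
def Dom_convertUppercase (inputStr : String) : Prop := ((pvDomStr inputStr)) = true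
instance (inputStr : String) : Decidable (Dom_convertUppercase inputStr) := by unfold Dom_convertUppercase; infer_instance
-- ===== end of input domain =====

-- B replaces A's per-character loop with a two-slice split (keep first len//2 chars, uppercase the rest); simpler, same result.

-- ===== PORT A =====
-- literal port: the loop accumulates the output character by character with a running counter
def convertUppercase (inputStr : String) : String :=
  let strLen : Int := PySem.Str.len inputStr
  String.ofList ((inputStr.toList.foldl
    (fun (st : List Char × Int) char =>
      let charScanned := st.2 + 1
      if charScanned ≤ PySem.Int.floordiv strLen 2 then
        (st.1 ++ [char], charScanned)
      else
        (st.1 ++ [PySem.Chars.upperChar char], charScanned))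
    ([], 0)).1)

-- ===== PORT B =====
def convertUppercase_alt (inputStr : String) : String :=
  let half : Int := PySem.Int.floordiv (PySem.Str.len inputStr) 2
  PySem.Str.slice inputStr none (some half) ++ PySem.Str.upper (PySem.Str.slice inputStr (some half) none)

-- ===== PRECONDITION & SPEC =====
def Spec_convertUppercase (inputStr : String) (out : String) : Prop := out = convertUppercase_alt inputStr
instance (inputStr : String) (out : String) : Decidable (Spec_convertUppercase inputStr out) := by unfold Spec_convertUppercase; infer_instance

-- ===== CLAIM (what is proved, stated in full; the proofs are below) =====
def Claim_equal_convertUppercase : Prop := ∀ (inputStr : String), Dom_convertUppercase inputStr → Spec_convertUppercase inputStr (convertUppercase inputStr)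

-- ===== LEMMAS AND PROOFS =====

-- A's loop, with counter started at k: keeps the first (m-k) characters, uppercases the rest
theorem pvLoop_eq (m : Int) (l : List Char) : ∀ (acc : List Char) (k : Int),
    (l.foldl
      (fun (st : List Char × Int) char =>
        let charScanned := st.2 + 1
        if charScanned ≤ m then
          (st.1 ++ [char], charScanned)
        else
          (st.1 ++ [PySem.Chars.upperChar char], charScanned))
      (acc, k)).1
    = acc ++ l.take (m - k).toNat ++ (l.drop (m - k).toNat).map PySem.Chars.upperChar := by
  induction l with
  | nil => simp
  | cons c t ih =>
    intro acc k
    simp only [List.foldl_cons]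
    by_cases h : k + 1 ≤ m
    · have ht : (m - k).toNat = (m - (k + 1)).toNat + 1 := by omega
      simp only [if_pos h, ih]
      simp [ht]
    · have ht : (m - k).toNat = 0 := by omega
      have ht' : (m - (k + 1)).toNat = 0 := by omega
      simp only [if_neg h, ih]
      simp [ht, ht']

-- ===== VERDICT (by name: the statement is the Claim_ definition above) =====
theorem convertUppercase_spec : Claim_equal_convertUppercase := by
  intro s _
  show convertUppercase s = convertUppercase_alt s
  unfold convertUppercase convertUppercase_alt
  have hlen : PySem.Str.len s = (s.toList.length : Int) := by simp [PySem.Str.len_eq]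
  set m : Int := PySem.Int.floordiv (PySem.Str.len s) 2 with hm
  have hm0 : 0 ≤ m := by
    rw [hm, hlen, PySem.Int.floordiv_eq_ediv_of_pos (by omega)]
    positivity
  apply String.toList_inj.mp
  simp only [pvLoop_eq]
  simp [PySem.Str.slice, PySem.Chars.slice_eq_listSlice, PySem.List.slice_to _ hm0,
        PySem.List.slice_from _ hm0, PySem.Chars.upper]
  rw [hm, hlen, PySem.Int.floordiv_eq_ediv_of_pos (by omega)]
  simp
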